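-- pv_equiv track=rewrite | github.com/kimsw99/Coding-Test | 프로그래머스/0/181887. 홀수 vs 짝수/홀수 vs 짝수.py | solution
-- ===== SOURCE A (Python) =====
-- def solution(num_list):
--     a = 0
--     b = 0
--     for i, num in enumerate(num_list):
--         if (i+1) % 2 == 0:
--             a += num
--         else:
--             b += num
--     if a > b:
--         return a
--     elif a < b :
--         return b
--     elif a == b :
--         return b
-- ===== SOURCE B (Python) =====
-- def solution(num_list):
--     even = sum(num_list[::2])
--     odd = sum(num_list[1::2])
--     return max(even, odd)
-- ===== Notes on version B (the rewrite author's own statement) =====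
-- stated objective: idiomatic
-- what changed: Replaced the enumerate/parity accumulator loop and three-way comparison with two strided-slice sums (num_list[::2], num_list[1::2]) and max.
import Mathlib
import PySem

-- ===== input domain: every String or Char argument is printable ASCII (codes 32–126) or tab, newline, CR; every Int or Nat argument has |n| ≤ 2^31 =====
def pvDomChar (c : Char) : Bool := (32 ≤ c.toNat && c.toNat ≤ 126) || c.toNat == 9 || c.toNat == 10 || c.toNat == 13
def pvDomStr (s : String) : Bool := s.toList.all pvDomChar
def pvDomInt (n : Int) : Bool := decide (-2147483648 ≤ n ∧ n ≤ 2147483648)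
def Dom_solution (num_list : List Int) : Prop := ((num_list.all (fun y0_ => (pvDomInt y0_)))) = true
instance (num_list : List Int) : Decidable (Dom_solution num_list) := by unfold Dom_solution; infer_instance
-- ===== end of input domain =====

-- B replaces A's enumerate/parity accumulator loop and three-way comparison with two strided-slice sums and max (idiomatic).


-- ===== PORT A =====
def solution (num_list : List Int) : Int :=
  let st := (PySem.List.enumerate num_list 0).foldl
    (fun (ab : Int × Int) p =>
      if PySem.Int.mod (p.1 + 1) 2 == 0 then (ab.1 + p.2, ab.2) else (ab.1, ab.2 + p.2))
    (0, 0)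
  if st.1 > st.2 then st.1
  else if st.1 < st.2 then st.2
  else st.2

-- ===== PORT B =====
def solution_alt (num_list : List Int) : Int :=
  let even := ((PySem.List.slice? num_list none none 2).getD []).sum
  let odd := ((PySem.List.slice? num_list (some 1) none 2).getD []).sum
  max even odd

-- ===== PRECONDITION & SPEC =====
def Spec_solution (num_list : List Int) (out : Int) : Prop := out = solution_alt num_list
instance (num_list : List Int) (out : Int) : Decidable (Spec_solution num_list out) := by unfold Spec_solution; infer_instance

-- ===== CLAIM (what is proved, stated in full; the proofs are below) =====
def Claim_equal_solution : Prop := ∀ (num_list : List Int), Dom_solution num_list → Spec_solution num_list (solution num_list)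

-- ===== LEMMAS AND PROOFS =====

/-- even-indexed elements of a list -/
def evens : List Int → List Int
  | [] => []
  | [x] => [x]
  | x :: _ :: t => x :: evens t

theorem evens_cons (x : Int) (t : List Int) : evens (x :: t) = x :: evens t.tail := by
  cases t <;> rfl

theorem slice2_evens (xs : List Int) :
    PySem.List.slice? xs none none 2 = some (evens xs) := by
  induction xs using evens.induct with
  | case1 => rfl
  | case2 x => simp [PySem.List.slice?, PySem.List.sliceIndices, evens]
  | case3 x y t ih =>
    simp only [PySem.List.slice?, PySem.List.sliceIndices, evens, OfNat.ofNat_ne_zero,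
      if_false] at ih ⊢
    simp at ih ⊢
    have hc : (if 0 < t.length then (((t.length : Int) + 2 - 1) / 2).toNat else 0)
        = (((t.length : Int) + 1) / 2).toNat := by split <;> omega
    have hcount : (if (0:Int) ≤ (t.length : Int) + 1
          then (((t.length : Int) + 1 + 1 + 2 - 1) / 2).toNat else 0)
        = (((t.length : Int) + 1) / 2).toNat + 1 := by split <;> omega
    have hfun : ∀ (k : Nat), (k ∈ List.range (((t.length : Int) + 1) / 2).toNat) →
        (fun i : Nat => (x :: y :: t)[(2 * (i:Int)).toNat]?) (Nat.succ k)
        = (fun i : Nat => t[(2 * (i:Int)).toNat]?) k := by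
      intro k _
      have h2 : (2 * ((Nat.succ k : Nat) : Int)).toNat = 2 * k + 1 + 1 := by
        simp [Nat.succ_eq_add_one]; omega
      have h3 : (2 * (k : Int)).toNat = 2 * k := by omega
      simp only [h2, h3, List.getElem?_cons_succ]
    rw [hcount, List.range_succ_eq_map, List.filterMap_cons]
    have h0 : ((2 : Int) * ((0:Nat) : Int)).toNat = 0 := by omega
    simp only [h0, List.getElem?_cons_zero, List.filterMap_map, Function.comp_def]
    rw [List.filterMap_congr (fun k hk => hfun k hk)]
    rw [hc] at ih
    rw [ih]
theorem slice2_odds (xs : List Int) :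
    PySem.List.slice? xs (some 1) none 2 = some (evens xs.tail) := by
  cases xs with
  | nil => rfl
  | cons x t =>
    have h := slice2_evens t
    simp only [PySem.List.slice?, PySem.List.sliceIndices, OfNat.ofNat_ne_zero,
      if_false] at h ⊢
    simp at h ⊢
    have hfun : ∀ (k : Nat), k ∈ List.range
          (if 0 < t.length then (((t.length : Int) + 2 - 1) / 2).toNat else 0) →
        (fun i : Nat => (x :: t)[(1 + 2 * (i:Int)).toNat]?) k
        = (fun i : Nat => t[(2 * (i:Int)).toNat]?) k := by
      intro k _
      have h2 : ((1 : Int) + 2 * (k : Int)).toNat = 2 * k + 1 := by omega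
      have h3 : (2 * (k : Int)).toNat = 2 * k := by omega
      simp only [h2, h3, List.getElem?_cons_succ]
    rw [List.filterMap_congr hfun]
    exact h

theorem foldA (xs : List Int) (s a b : Int) :
    (PySem.List.enumerate xs s).foldl
      (fun (ab : Int × Int) p =>
        if PySem.Int.mod (p.1 + 1) 2 == 0 then (ab.1 + p.2, ab.2) else (ab.1, ab.2 + p.2))
      (a, b)
    = if s % 2 = 0 then (a + (evens xs.tail).sum, b + (evens xs).sum)
      else (a + (evens xs).sum, b + (evens xs.tail).sum) := by
  induction xs generalizing s a b with
  | nil => simp [PySem.List.enumerate, evens]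
  | cons x t ih =>
    rw [PySem.List.enumerate_cons]
    simp only [List.foldl_cons]
    have hf : PySem.Int.mod (s + 1) 2 = (s + 1) % 2 := by
      simp only [PySem.Int.mod]; rw [Int.fmod_eq_emod]; simp
    rcases Int.emod_two_eq_zero_or_one s with h | h
    · rw [if_neg (show ¬ ((PySem.Int.mod (s + 1) 2 == 0) = true) by
        simp only [hf, beq_iff_eq]; omega), ih]
      rw [if_neg (show ¬ (s + 1) % 2 = 0 by omega), if_pos h, evens_cons]
      simp only [List.tail_cons, List.sum_cons, Prod.mk.injEq]
      constructor <;> first | trivial | ring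
    · rw [if_pos (show (PySem.Int.mod (s + 1) 2 == 0) = true by
        simp only [hf, beq_iff_eq]; omega), ih]
      rw [if_pos (show (s + 1) % 2 = 0 by omega), if_neg (show ¬ s % 2 = 0 by omega), evens_cons]
      simp only [List.tail_cons, List.sum_cons, Prod.mk.injEq]
      constructor <;> first | trivial | ring

-- ===== VERDICT (by name: the statement is the Claim_ definition above) =====
theorem solution_spec : Claim_equal_solution := by
  intro xs _
  unfold Spec_solution solution solution_alt
  rw [slice2_evens, slice2_odds]
  simp only [Option.getD_some]
  rw [foldA]
  simp only [Int.zero_emod, zero_add]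
  rcases lt_trichotomy ((evens xs.tail).sum) ((evens xs).sum) with h | h | h <;>
    simp [max_def] <;> omega
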